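-- pv_equiv track=rewrite | github.com/smc5720/Programmers | 징검다리 건너기.py | check
-- ===== SOURCE A (Python) =====
-- def check(k, stones, friend):
--     # 출발지점: -1(0, 1, 2) / 도착지점: len(stones)(-3, -2, -1)
--     index = -1
--     # 디딤돌의 최대 간격을 의미한다.
--     gap = 0
--     for i in range(len(stones)):
--         # friend는 mid 값, 징검다리를 건너고자 하는 총 인원을 나타낸다.
--         if stones[i] >= friend:
--             gap = max(gap, i - index)
--             index = i
--     # 디딤돌의 최대 간격이 k보다 클 경우 전원이 통과할 수 없다.
--     gap = max(gap, len(stones) - index)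
--     if gap > k:
--         return False
--     return True
-- ===== SOURCE B (Python) =====
-- def check(k, stones, friend):
--     # Sliding-window reformulation: everyone passes iff every window of k
--     # consecutive stones contains a stone that can carry `friend` people.
--     n = len(stones)
--     i = 0
--     while i + k <= n:
--         if all(stones[j] < friend for j in range(i, i + k)):
--             return False
--         i += 1
--     return True
-- ===== Notes on version B (the rewrite author's own statement) =====
-- stated objective: alternative
-- what changed: B replaces A's single-pass last-usable-index/max-gap scan by a brute-force sliding-window check: everyone can cross iff every window of k consecutive stones contains a stone >= friend, tested with a while loop over window starts and an inner all() over the window.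
import Mathlib
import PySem

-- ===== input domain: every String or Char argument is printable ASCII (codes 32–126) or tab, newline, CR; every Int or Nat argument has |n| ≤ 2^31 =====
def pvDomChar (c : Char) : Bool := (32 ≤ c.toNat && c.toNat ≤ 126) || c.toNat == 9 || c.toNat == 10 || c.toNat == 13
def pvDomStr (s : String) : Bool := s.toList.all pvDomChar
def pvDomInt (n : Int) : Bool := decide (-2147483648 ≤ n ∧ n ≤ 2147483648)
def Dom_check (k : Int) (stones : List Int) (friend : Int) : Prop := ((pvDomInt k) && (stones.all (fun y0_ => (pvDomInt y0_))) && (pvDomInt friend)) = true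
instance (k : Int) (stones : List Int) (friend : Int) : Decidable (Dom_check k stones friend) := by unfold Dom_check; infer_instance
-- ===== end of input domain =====

-- B replaces A's last-usable-index/max-gap scan by a sliding-window check
-- (every window of k consecutive stones must contain a stone >= friend): alternative algorithm, not faster.
-- ===== PORT A =====
-- loop over i in range(len(stones)), state (index, gap); stones given as the remaining list
def checkLoop (l : List Int) (i index gap friend : Int) : Int × Int :=
  match l with
  | [] => (index, gap)
  | s :: t =>
    if s ≥ friend then checkLoop t (i + 1) i (max gap (i - index)) friend
    else checkLoop t (i + 1) index gap friend

def check (k : Int) (stones : List Int) (friend : Int) : Bool :=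
  let p := checkLoop stones 0 (-1) 0 friend
  let gap := max p.2 ((stones.length : Int) - p.1)
  if gap > k then false else true

-- ===== PORT B =====
-- while i + k <= n: if all(stones[j] < friend for j in range(i, i+k)): return False; i += 1
-- (pyGetD is exact here: every j ∈ range(i, i+k) satisfies 0 ≤ i ≤ j < i+k ≤ len, so stones[j] never raises)
def altLoop (stones : List Int) (k friend i : Int) : Bool :=
  if h : i + k ≤ (stones.length : Int) then
    if (PySem.List.pyRange i (i + k) 1).all
        (fun j => decide (PySem.List.pyGetD stones j 0 < friend)) then
      false
    else altLoop stones k friend (i + 1)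
  else true
termination_by ((stones.length : Int) - k - i + 1).toNat
decreasing_by omega

def check_alt (k : Int) (stones : List Int) (friend : Int) : Bool :=
  altLoop stones k friend 0

-- ===== PRECONDITION & SPEC =====
def Spec_check (k : Int) (stones : List Int) (friend : Int) (out : Bool) : Prop := out = check_alt k stones friend
instance (k : Int) (stones : List Int) (friend : Int) (out : Bool) : Decidable (Spec_check k stones friend out) := by unfold Spec_check; infer_instance

-- ===== CLAIM (what is proved, stated in full; the proofs are below) =====
def Claim_equal_check : Prop := ∀ (k : Int) (stones : List Int) (friend : Int), Dom_check k stones friend → Spec_check k stones friend (check k stones friend)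

-- ===== LEMMAS AND PROOFS =====

-- proof-only helper: the classic "longest run of stones below friend" scan;
-- A's max gap equals this + 1 (loop_inv), and a run of length ≥ k is exactly a bad window (key/hasRun).
def runLoop (l : List Int) (run maxrun friend : Int) : Int :=
  match l with
  | [] => maxrun
  | s :: t =>
    if s < friend then runLoop t (run + 1) (max maxrun (run + 1)) friend
    else runLoop t 0 maxrun friend

-- L contains k consecutive elements all < friend
def hasRun (L : List Int) (k friend : Int) : Prop :=
  ∃ p m s, L = p ++ m ++ s ∧ (∀ x ∈ m, x < friend) ∧ k ≤ (m.length : Int)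

-- Invariant tying A's (index, gap) loop to the run scan
theorem loop_inv (l : List Int) : ∀ (i index gap run maxrun friend : Int),
    run = i - index - 1 → 0 ≤ run → 0 ≤ maxrun → max gap (i - index) = maxrun + 1 →
    max (checkLoop l i index gap friend).2
        ((i + (l.length : Int)) - (checkLoop l i index gap friend).1)
      = runLoop l run maxrun friend + 1 := by
  induction l with
  | nil =>
    intro i index gap run maxrun friend hr hr0 hm0 hm
    simpa [checkLoop, runLoop] using hm
  | cons s t ih =>
    intro i index gap run maxrun friend hr hr0 hm0 hm
    by_cases h : s ≥ friend
    · have h2 : ¬ s < friend := by omega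
      simp only [checkLoop, runLoop, if_pos h, if_neg h2]
      have := ih (i + 1) i (max gap (i - index)) 0 maxrun friend (by omega)
        le_rfl hm0 (by omega)
      simpa [add_assoc, add_comm, add_left_comm] using this
    · have h2 : s < friend := by omega
      simp only [checkLoop, runLoop, if_neg h, if_pos h2]
      have := ih (i + 1) index gap (run + 1) (max maxrun (run + 1)) friend
        (by omega) (by omega) (by omega) (by omega)
      simpa [add_assoc, add_comm, add_left_comm] using this

-- A in closed form: gap ≤ k ⟺ longest run + 1 ≤ k
theorem check_eq_run (k : Int) (stones : List Int) (friend : Int) :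
    check k stones friend = decide (runLoop stones 0 0 friend + 1 ≤ k) := by
  unfold check
  have h := loop_inv stones 0 (-1) 0 0 0 friend (by omega) le_rfl le_rfl (by omega)
  simp only [zero_add] at h
  dsimp only
  split
  · next hgt => have : ¬ (runLoop stones 0 0 friend + 1 ≤ k) := by omega
                simp [this]
  · next hle => have : runLoop stones 0 0 friend + 1 ≤ k := by omega
                simp [this]

-- characterisation of the run scan
theorem runLoop_key (friend : Int) (L : List Int) : ∀ (run maxrun k : Int),
    0 ≤ run → run ≤ maxrun →
    (k ≤ runLoop L run maxrun friend ↔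
      k ≤ maxrun ∨
      (∃ m s, L = m ++ s ∧ (∀ x ∈ m, x < friend) ∧ k ≤ run + (m.length : Int)) ∨
      hasRun L k friend) := by
  induction L with
  | nil =>
    intro run maxrun k h0 hrm
    simp only [runLoop]
    constructor
    · intro h; exact Or.inl h
    · rintro (h | ⟨m, s, hL, _, hk⟩ | ⟨p, m, s, hL, _, hk⟩)
      · exact h
      · have : m = [] := by
          cases m with
          | nil => rfl
          | cons a t => simp at hL
        subst this; simp at hk; omega
      · have : m = [] := by
          cases p with
          | nil => cases m with
            | nil => rfl
            | cons a t => simp at hL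
          | cons a t => simp at hL
        subst this; simp at hk; omega
  | cons s t ih =>
    intro run maxrun k h0 hrm
    by_cases hs : s < friend
    · simp only [runLoop, if_pos hs]
      rw [ih (run + 1) (max maxrun (run + 1)) k (by omega) (le_max_right _ _)]
      constructor
      · rintro (h | ⟨m', s', hL, hall, hk⟩ | ⟨p, m', s', hL, hall, hk⟩)
        · rcases le_max_iff.mp h with h1 | h1
          · exact Or.inl h1
          · refine Or.inr (Or.inl ⟨[s], t, by simp, ?_, by simp; omega⟩)
            intro x hx; simp at hx; subst hx; exact hs
        · refine Or.inr (Or.inl ⟨s :: m', s', by simp [hL], ?_, by simp; omega⟩)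
          intro x hx; rcases List.mem_cons.mp hx with h | h
          · subst h; exact hs
          · exact hall x h
        · exact Or.inr (Or.inr ⟨s :: p, m', s', by simp [hL], hall, hk⟩)
      · rintro (h | ⟨m', s', hL, hall, hk⟩ | ⟨p, m', s', hL, hall, hk⟩)
        · exact Or.inl (le_max_of_le_left h)
        · cases m' with
          | nil => simp at hk; exact Or.inl (le_max_of_le_right (by omega))
          | cons a m'' =>
            have ha : a = s ∧ t = m'' ++ s' := by
              constructor
              · exact (List.cons.injEq .. ▸ hL).1.symm
              · exact ((List.cons.injEq .. ▸ hL).2)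
            obtain ⟨rfl, ht⟩ := ha
            refine Or.inr (Or.inl ⟨m'', s', ht, fun x hx => hall x (List.mem_cons_of_mem _ hx), by simp at hk ⊢; omega⟩)
        · cases p with
          | nil =>
            simp only [List.nil_append] at hL
            cases m' with
            | nil => simp at hk; exact Or.inl (le_max_of_le_right (by omega))
            | cons a m'' =>
              have ha : a = s ∧ t = m'' ++ s' := by
                constructor
                · exact (List.cons.injEq .. ▸ hL).1.symm
                · exact ((List.cons.injEq .. ▸ hL).2)
              obtain ⟨rfl, ht⟩ := ha
              refine Or.inr (Or.inl ⟨m'', s', ht, fun x hx => hall x (List.mem_cons_of_mem _ hx), by simp at hk ⊢; omega⟩)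
          | cons a p' =>
            have ht : t = p' ++ m' ++ s' := (List.cons.injEq .. ▸ hL).2
            exact Or.inr (Or.inr ⟨p', m', s', ht, hall, hk⟩)
    · simp only [runLoop, if_neg hs]
      rw [ih 0 maxrun k le_rfl (by omega)]
      constructor
      · rintro (h | ⟨m', s', hL, hall, hk⟩ | ⟨p, m', s', hL, hall, hk⟩)
        · exact Or.inl h
        · exact Or.inr (Or.inr ⟨[s], m', s', by simp [hL], hall, by simpa using hk⟩)
        · exact Or.inr (Or.inr ⟨s :: p, m', s', by simp [hL], hall, hk⟩)
      · rintro (h | ⟨m', s', hL, hall, hk⟩ | ⟨p, m', s', hL, hall, hk⟩)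
        · exact Or.inl h
        · cases m' with
          | nil => simp at hk; exact Or.inl (by omega)
          | cons a m'' =>
            have ha : a = s := (List.cons.injEq .. ▸ hL).1.symm
            exact absurd (hall a (List.mem_cons_self ..)) (by rw [ha]; exact hs)
        · cases p with
          | nil =>
            simp only [List.nil_append] at hL
            cases m' with
            | nil => simp at hk; exact Or.inl (by omega)
            | cons a m'' =>
              have ha : a = s := (List.cons.injEq .. ▸ hL).1.symm
              exact absurd (hall a (List.mem_cons_self ..)) (by rw [ha]; exact hs)
          | cons a p' =>
            have ht : t = p' ++ m' ++ s' := (List.cons.injEq .. ▸ hL).2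
            exact Or.inr (Or.inr ⟨p', m', s', ht, hall, hk⟩)

theorem runLoop_iff_hasRun (L : List Int) (k friend : Int) :
    k ≤ runLoop L 0 0 friend ↔ hasRun L k friend := by
  rw [runLoop_key friend L 0 0 k le_rfl le_rfl]
  constructor
  · rintro (h | ⟨m, s, hL, hall, hk⟩ | h)
    · exact ⟨[], [], L, by simp, by simp, by simpa using h⟩
    · exact ⟨[], m, s, by simpa using hL, hall, by simpa using hk⟩
    · exact h
  · intro h; exact Or.inr (Or.inr h)

-- runs ⟺ all-below windows (index form used by B)
theorem hasRun_iff_window (L : List Int) (k friend : Int) :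
    hasRun L k friend ↔
      ∃ m : Int, 0 ≤ m ∧ m + k ≤ (L.length : Int) ∧
        ∀ j : Int, m ≤ j → j < m + k → PySem.List.pyGetD L j 0 < friend := by
  constructor
  · rintro ⟨p, mm, s, hL, hall, hk⟩
    refine ⟨(p.length : Int), Int.natCast_nonneg _, ?_, ?_⟩
    · subst hL; simp; omega
    · intro j hj1 hj2
      have hlen : (L.length : Int) = p.length + mm.length + s.length := by
        subst hL; simp; omega
      have hj0 : 0 ≤ j := le_trans (Int.natCast_nonneg _) hj1
      have hjn : j < (L.length : Int) := by omega
      rw [PySem.List.pyGetD_eq_getElem L 0 hj0 (by omega)]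
      have hge : p.length ≤ j.toNat := by omega
      have hlt : j.toNat < p.length + mm.length := by omega
      have hx : L[j.toNat]'(by omega) ∈ mm := by
        subst hL
        rw [List.getElem_append_left (as := p ++ mm) (by simp; omega)]
        rw [List.getElem_append_right (by simpa using hge)]
        exact List.getElem_mem _
      exact hall _ hx
  · rintro ⟨m, hm0, hmk, hbelow⟩
    by_cases hk : k ≤ 0
    · exact ⟨[], [], L, by simp, by simp, by simpa using hk⟩
    · push_neg at hk
      refine ⟨L.take m.toNat, (L.drop m.toNat).take k.toNat, (L.drop m.toNat).drop k.toNat,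
        by rw [List.append_assoc, List.take_append_drop, List.take_append_drop], ?_, ?_⟩
      · intro x hx
        obtain ⟨i, hi, rfl⟩ := List.mem_iff_getElem.mp hx
        have hilen : i < k.toNat := by
          have := hi; simp [List.length_take, List.length_drop] at this; omega
        have hidrop : m.toNat + i < L.length := by
          have := hi; simp [List.length_take, List.length_drop] at this; omega
        have : ((L.drop m.toNat).take k.toNat)[i]'hi = L[m.toNat + i]'hidrop := by
          rw [List.getElem_take, List.getElem_drop]
        rw [this]
        have hj1 : m ≤ ((m.toNat + i : Nat) : Int) := by push_cast; omega
        have hj2 : ((m.toNat + i : Nat) : Int) < m + k := by push_cast; omega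
        have := hbelow ((m.toNat + i : Nat) : Int) hj1 hj2
        rwa [PySem.List.pyGetD_eq_getElem L 0 (Int.natCast_nonneg _) (by push_cast; omega)] at this
      · simp [List.length_take, List.length_drop]; omega

-- B in closed form: true ⟺ no window starting at ≥ i is all-below
theorem altLoop_iff (stones : List Int) (k friend : Int) : ∀ i : Int,
    altLoop stones k friend i = true ↔
      ∀ m : Int, i ≤ m → m + k ≤ (stones.length : Int) →
        ∃ j : Int, m ≤ j ∧ j < m + k ∧ friend ≤ PySem.List.pyGetD stones j 0 := by
  intro i
  induction i using altLoop.induct stones k friend with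
  | case1 i h hall =>
    rw [altLoop]; simp only [dif_pos h, if_pos hall]
    simp only [Bool.false_eq_true, false_iff]
    intro hw
    obtain ⟨j, hj1, hj2, hj3⟩ := hw i le_rfl h
    have := List.all_eq_true.mp hall j (PySem.List.mem_pyRange_one.mpr ⟨hj1, hj2⟩)
    simp at this; omega
  | case2 i h hall ih =>
    rw [altLoop]; simp only [dif_pos h, if_neg hall]
    rw [ih]
    constructor
    · intro hrest m hm hmk
      rcases eq_or_lt_of_le hm with rfl | hlt
      · -- the window at i itself is not all-below
        obtain ⟨j, hj1, hj2, hj3⟩ :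
            ∃ j, i ≤ j ∧ j < i + k ∧ friend ≤ PySem.List.pyGetD stones j 0 := by
          simpa using hall
        exact ⟨j, hj1, hj2, hj3⟩
      · exact hrest m (by omega) hmk
    · intro hw m hm hmk; exact hw m (by omega) hmk
  | case3 i h =>
    rw [altLoop]; simp only [dif_neg h, true_iff]
    intro m hm hmk; omega

-- ===== VERDICT (by name: the statement is the Claim_ definition above) =====
theorem check_spec : Claim_equal_check := by
  intro k stones friend _
  unfold Spec_check check_alt
  rw [check_eq_run, Bool.eq_iff_iff, altLoop_iff]
  rw [decide_eq_true_iff]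
  constructor
  · intro h m hm hmk
    by_contra hno
    push_neg at hno
    have : hasRun stones k friend := by
      rw [hasRun_iff_window]
      exact ⟨m, hm, hmk, fun j hj1 hj2 => by have := hno j hj1 hj2; omega⟩
    rw [← runLoop_iff_hasRun] at this; omega
  · intro h
    by_contra hno
    have : hasRun stones k friend := by rw [← runLoop_iff_hasRun]; omega
    rw [hasRun_iff_window] at this
    obtain ⟨m, hm0, hmk, hbelow⟩ := this
    obtain ⟨j, hj1, hj2, hj3⟩ := h m hm0 hmk
    have := hbelow j hj1 hj2; omega
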